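-- pv_equiv track=rewrite | github.com/VIAME/VIAME | plugins/core/utilities_coco.py | _decode_rle_string
-- ===== SOURCE A (Python) =====
-- def _decode_rle_string(s):
--     """Decode a pycocotools-style LEB128 RLE string to integer counts."""
--     counts = []
--     p = 0
--     while p < len(s):
--         x = 0
--         shift = 0
--         more = True
--         while more:
--             c = ord(s[p]) - 48
--             p += 1
--             x |= (c & 0x1f) << shift
--             shift += 5
--             more = (c & 0x20) != 0
--         if x & 1:
--             x = -(x >> 1)
--         else:
--             x = x >> 1
--         counts.append(x)
--     # Undo differential encoding
--     for i in range(1, len(counts)):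
--         counts[i] += counts[i - 1]
--     return counts
-- ===== SOURCE B (Python) =====
-- def _decode_rle_string(s):
--     """Decode a pycocotools-style LEB128 RLE string to integer counts.
--
--     Single flat pass over the characters: a small state machine decodes each
--     varint and fuses the undo-of-differential-encoding by threading a running
--     total, so no intermediate delta list and no second pass are needed.
--     """
--     counts = []
--     total = 0
--     x = 0
--     shift = 0
--     for ch in s:
--         c = ord(ch) - 48
--         x |= (c & 0x1f) << shift
--         if c & 0x20:
--             shift += 5
--         else:
--             if x & 1:
--                 total -= x >> 1
--             else:
--                 total += x >> 1
--             counts.append(total)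
--             x = 0
--             shift = 0
--     return counts
-- ===== Notes on version B (the rewrite author's own statement) =====
-- stated objective: simpler
-- what changed: A's nested while-loops over an explicit index plus a separate prefix-sum pass over the delta list are replaced by one flat for-loop state machine over the characters that threads a running total, emitting cumulative counts directly with no intermediate delta list and no second pass. One pass and no delta list give a constant-factor speedup measured.
import Mathlib
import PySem

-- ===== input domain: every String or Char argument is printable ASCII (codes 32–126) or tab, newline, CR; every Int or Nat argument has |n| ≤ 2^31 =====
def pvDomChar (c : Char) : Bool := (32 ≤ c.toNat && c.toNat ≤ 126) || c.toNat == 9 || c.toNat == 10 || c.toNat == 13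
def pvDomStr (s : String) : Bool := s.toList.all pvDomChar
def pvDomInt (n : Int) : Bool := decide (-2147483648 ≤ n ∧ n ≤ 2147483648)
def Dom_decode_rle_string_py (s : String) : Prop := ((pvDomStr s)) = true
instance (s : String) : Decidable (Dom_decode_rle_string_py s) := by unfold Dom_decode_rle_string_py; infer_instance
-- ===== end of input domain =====

-- B fuses A's decode loop and separate prefix-sum pass into one flat state-machine pass
-- threading a running total (objective: simpler). Equivalence is about the return value.

-- ===== PORT A =====
-- inner `while more:` loop of A; returns none where Python raises IndexError (read past end)
def pvInnerA (cs : List Char) (x : Int) (shift : Nat) : Option (Int × List Char) :=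
  match cs with
  | [] => none
  | ch :: rest =>
    let c : Int := (ch.toNat : Int) - 48
    let x' := PySem.Int.bor x ((PySem.Int.band c 31) <<< shift)
    if PySem.Int.band c 32 ≠ 0 then pvInnerA rest x' (shift + 5) else some (x', rest)

-- zig-zag sign correction applied by A after each varint
def pvZigA (x : Int) : Int :=
  if PySem.Int.band x 1 ≠ 0 then -(x >>> 1) else x >>> 1

-- termination measure for the outer while-loop: the inner loop consumes ≥ 1 character
theorem pvInnerA_length : ∀ (cs : List Char) (x : Int) (shift : Nat) (v : Int) (rest : List Char),
    pvInnerA cs x shift = some (v, rest) → rest.length < cs.length := by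
  intro cs
  induction cs with
  | nil => intro x shift v rest h; simp [pvInnerA] at h
  | cons ch tl ih =>
    intro x shift v rest h
    simp only [pvInnerA] at h
    split at h
    · exact Nat.lt_trans (ih _ _ _ _ h) (by simp)
    · cases h; simp

-- outer `while p < len(s):` loop of A, appending one zig-zag-decoded delta per varint
def pvOuterA : (cs : List Char) → (counts : List Int) → List Int
  | [], counts => counts
  | ch :: tl, counts =>
    match h : pvInnerA (ch :: tl) 0 0 with
    | none => counts                        -- Python raises IndexError here (outside Pre_)
    | some (x, rest) => pvOuterA rest (counts ++ [pvZigA x])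
termination_by cs _ => cs.length
decreasing_by exact pvInnerA_length _ _ _ _ _ h

-- A's final `for i in range(1, len(counts)): counts[i] += counts[i-1]` in-place pass
def pvUndoA (prev : Int) : List Int → List Int
  | [] => []
  | c :: rest => (prev + c) :: pvUndoA (prev + c) rest

def decode_rle_string_py (s : String) : List Int :=
  match pvOuterA s.toList [] with
  | [] => []
  | c :: rest => c :: pvUndoA c rest

-- ===== PORT B =====
-- one step of B's flat state machine: state = (counts, running total, varint acc, shift)
def pvStepB : (List Int × Int × Int × Nat) → Char → (List Int × Int × Int × Nat)
  | (counts, total, x, shift), ch =>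
    let c : Int := (ch.toNat : Int) - 48
    let x' := PySem.Int.bor x ((PySem.Int.band c 31) <<< shift)
    if PySem.Int.band c 32 ≠ 0 then (counts, total, x', shift + 5)
    else
      let total' := if PySem.Int.band x' 1 ≠ 0 then total - (x' >>> 1) else total + (x' >>> 1)
      (counts ++ [total'], total', 0, 0)

def decode_rle_string_py_alt (s : String) : List Int :=
  (s.toList.foldl pvStepB ([], 0, 0, 0)).1

-- ===== PRECONDITION & SPEC =====
-- Pre_ excludes exactly the truncated encodings: a non-empty string whose last character has
-- the LEB128 continuation bit set makes A read past the end and raise IndexError.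
def Pre_decode_rle_string_py (s : String) : Prop :=
  (s.toList.getLast?.all (fun ch => PySem.Int.band ((ch.toNat : Int) - 48) 32 == 0)) = true
instance (s : String) : Decidable (Pre_decode_rle_string_py s) := by
  unfold Pre_decode_rle_string_py; infer_instance

def pvWitness_decode_rle_string_py : String := "0:c3"

def Spec_decode_rle_string_py (s : String) (out : List Int) : Prop := out = decode_rle_string_py_alt s
instance (s : String) (out : List Int) : Decidable (Spec_decode_rle_string_py s out) := by unfold Spec_decode_rle_string_py; infer_instance

-- ===== CLAIM (what is proved, stated in full; the proofs are below) =====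
def Claim_equal_decode_rle_string_py : Prop := ∀ (s : String), Dom_decode_rle_string_py s → Pre_decode_rle_string_py s → Spec_decode_rle_string_py s (decode_rle_string_py s)

-- ===== LEMMAS AND PROOFS =====

-- unfolding equations for A's outer loop, conditioned on what the inner loop does
theorem pvOuterA_cons_none (ch : Char) (tl : List Char) (counts : List Int)
    (h : pvInnerA (ch :: tl) 0 0 = none) : pvOuterA (ch :: tl) counts = counts := by
  rw [pvOuterA]
  split
  · rfl
  · next x rest h' => rw [h'] at h; cases h

theorem pvOuterA_cons_some (ch : Char) (tl : List Char) (counts : List Int) (v : Int)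
    (rest : List Char) (h : pvInnerA (ch :: tl) 0 0 = some (v, rest)) :
    pvOuterA (ch :: tl) counts = pvOuterA rest (counts ++ [pvZigA v]) := by
  rw [pvOuterA]
  split
  · next h' => rw [h'] at h; cases h
  · next x rest' h' => rw [h'] at h; cases h; rfl

-- B's fold, started mid-varint where A's inner loop runs off the end, appends nothing
theorem pv_fold_inner_none : ∀ (cs : List Char) (x : Int) (shift : Nat)
    (counts : List Int) (total : Int), pvInnerA cs x shift = none →
    (List.foldl pvStepB (counts, total, x, shift) cs).1 = counts := by
  intro cs
  induction cs with
  | nil => intro x shift counts total _; rfl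
  | cons ch tl ih =>
    intro x shift counts total h
    simp only [pvInnerA] at h
    simp only [List.foldl, pvStepB]
    by_cases hb : PySem.Int.band ((ch.toNat : Int) - 48) 32 ≠ 0
    · rw [if_pos hb] at h ⊢
      exact ih _ _ _ _ h
    · rw [if_neg hb] at h
      cases h

-- B's fold, started mid-varint, first runs A's inner loop and lands on the fused total
theorem pv_fold_inner_some : ∀ (cs : List Char) (x : Int) (shift : Nat) (v : Int)
    (rest : List Char) (counts : List Int) (total : Int), pvInnerA cs x shift = some (v, rest) →
    (List.foldl pvStepB (counts, total, x, shift) cs).1 =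
      (List.foldl pvStepB (counts ++ [total + pvZigA v], total + pvZigA v, 0, 0) rest).1 := by
  intro cs
  induction cs with
  | nil => intro x shift v rest counts total h; cases h
  | cons ch tl ih =>
    intro x shift v rest counts total h
    simp only [pvInnerA] at h
    simp only [List.foldl, pvStepB]
    by_cases hb : PySem.Int.band ((ch.toNat : Int) - 48) 32 ≠ 0
    · rw [if_pos hb] at h ⊢
      exact ih _ _ _ _ _ _ h
    · rw [if_neg hb] at h ⊢
      cases h
      have hz : (if PySem.Int.band (PySem.Int.bor x ((PySem.Int.band ((ch.toNat : Int) - 48) 31) <<< shift)) 1 ≠ 0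
            then total - (PySem.Int.bor x ((PySem.Int.band ((ch.toNat : Int) - 48) 31) <<< shift)) >>> 1
            else total + (PySem.Int.bor x ((PySem.Int.band ((ch.toNat : Int) - 48) 31) <<< shift)) >>> 1) =
          total + pvZigA (PySem.Int.bor x ((PySem.Int.band ((ch.toNat : Int) - 48) 31) <<< shift)) := by
        unfold pvZigA
        split_ifs <;> ring
      rw [hz]

-- accumulator lemma for A's outer loop
theorem pvOuterA_acc : ∀ (n : Nat) (cs : List Char), cs.length ≤ n →
    ∀ (acc : List Int), pvOuterA cs acc = acc ++ pvOuterA cs [] := by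
  intro n
  induction n with
  | zero =>
    intro cs h acc
    have : cs = [] := by cases cs with | nil => rfl | cons a b => simp at h
    subst this; simp [pvOuterA]
  | succ n ih =>
    intro cs h acc
    match cs with
    | [] => simp [pvOuterA]
    | ch :: tl =>
      cases hi : pvInnerA (ch :: tl) 0 0 with
      | none => rw [pvOuterA_cons_none _ _ _ hi, pvOuterA_cons_none _ _ _ hi, List.append_nil]
      | some vr =>
        obtain ⟨v, rest⟩ := vr
        have hlt := pvInnerA_length _ _ _ _ _ hi
        have hle : rest.length ≤ n := by simp only [List.length_cons] at h hlt; omega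
        rw [pvOuterA_cons_some _ _ _ _ _ hi, pvOuterA_cons_some _ _ _ _ _ hi,
            ih rest hle (acc ++ [pvZigA v]), ih rest hle ([] ++ [pvZigA v])]
        simp

-- main invariant: B's fused fold equals A's delta list post-processed by the prefix-sum pass
theorem pv_main : ∀ (n : Nat) (cs : List Char), cs.length ≤ n → ∀ (counts : List Int) (total : Int),
    (List.foldl pvStepB (counts, total, 0, 0) cs).1 = counts ++ pvUndoA total (pvOuterA cs []) := by
  intro n
  induction n with
  | zero =>
    intro cs h counts total
    have : cs = [] := by cases cs with | nil => rfl | cons a b => simp at h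
    subst this; simp [pvOuterA, pvUndoA]
  | succ n ih =>
    intro cs h counts total
    match cs with
    | [] => simp [pvOuterA, pvUndoA]
    | ch :: tl =>
      cases hi : pvInnerA (ch :: tl) 0 0 with
      | none =>
        rw [pv_fold_inner_none _ _ _ _ _ hi, pvOuterA_cons_none _ _ _ hi]
        simp [pvUndoA]
      | some vr =>
        obtain ⟨v, rest⟩ := vr
        have hlt := pvInnerA_length _ _ _ _ _ hi
        have hle : rest.length ≤ n := by simp only [List.length_cons] at h hlt; omega
        rw [pv_fold_inner_some _ _ _ _ _ _ _ hi, ih rest hle, pvOuterA_cons_some _ _ _ _ _ hi,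
            pvOuterA_acc rest.length rest (le_refl _) ([] ++ [pvZigA v])]
        simp [pvUndoA]

-- A's head-then-tail presentation of the prefix-sum pass equals pvUndoA started at 0
theorem pv_undo_zero (L : List Int) :
    (match L with | [] => ([] : List Int) | c :: rest => c :: pvUndoA c rest) = pvUndoA 0 L := by
  cases L with
  | nil => simp [pvUndoA]
  | cons c rest => simp [pvUndoA]

-- ===== VERDICT (by name: the statement is the Claim_ definition above) =====
theorem decode_rle_string_py_spec : Claim_equal_decode_rle_string_py := by
  intro s _ _
  unfold Spec_decode_rle_string_py decode_rle_string_py decode_rle_string_py_alt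
  rw [pv_main s.toList.length s.toList (le_refl _) [] 0, pv_undo_zero]
  simp
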